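-- pv_equiv track=rewrite | github.com/xh-xihe/AI4QECC | loss_method/stifiel_cyclic_check.py | _orbit_indices
-- ===== SOURCE A (Python) =====
-- def _int_to_bits(i: int, L: int) -> tuple:
--     return tuple((i >> (L-1-p)) & 1 for p in range(L))
--
-- def _bits_to_int(bits: tuple) -> int:
--     v = 0
--     for b in bits:
--         v = (v << 1) | b
--     return v
--
-- def _rotate_tuple(t: tuple, r: int = 1) -> tuple:
--     n = len(t); r %= n
--     return t[-r:] + t[:-r] if r else t
--
-- def _orbit_indices(i0: int, L: int) -> list:
--     """返回整数索引组成的循环轨道（去重、有序）"""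
--     x = _int_to_bits(i0, L)
--     seen = {}
--     cur = x; r = 0
--     while cur not in seen:
--         seen[cur] = r
--         r += 1
--         cur = _rotate_tuple(cur, 1)
--     # 按首次出现次序还原
--     orb = [w for w,_ in sorted(seen.items(), key=lambda kv: kv[1])]
--     return [_bits_to_int(w) for w in orb]
-- ===== SOURCE B (Python) =====
-- def _orbit_indices(i0: int, L: int) -> list:
--     # Closed-form bit arithmetic: the r-th cyclic right-rotation of the L-bit
--     # value v is ((v >> r) | (v << (L - r))) & mask, computed independently for
--     # every r in range(L); dict.fromkeys then keeps the first occurrences in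
--     # order, which is exactly the orbit in first-appearance order.
--     mask = (1 << L) - 1
--     v = i0 & mask
--     rots = [((v >> r) | (v << (L - r))) & mask for r in range(L)]
--     return list(dict.fromkeys(rots))
-- ===== Notes on version B (the rewrite author's own statement) =====
-- stated objective: faster
-- what changed: B replaces A's repeated tuple rotation with seen-dict bookkeeping and a final sort by closed-form integer bit rotations ((v>>r)|(v<<(L-r)))&mask computed independently for every r in range(L), deduplicated in first-occurrence order by dict.fromkeys.
import Mathlib
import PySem

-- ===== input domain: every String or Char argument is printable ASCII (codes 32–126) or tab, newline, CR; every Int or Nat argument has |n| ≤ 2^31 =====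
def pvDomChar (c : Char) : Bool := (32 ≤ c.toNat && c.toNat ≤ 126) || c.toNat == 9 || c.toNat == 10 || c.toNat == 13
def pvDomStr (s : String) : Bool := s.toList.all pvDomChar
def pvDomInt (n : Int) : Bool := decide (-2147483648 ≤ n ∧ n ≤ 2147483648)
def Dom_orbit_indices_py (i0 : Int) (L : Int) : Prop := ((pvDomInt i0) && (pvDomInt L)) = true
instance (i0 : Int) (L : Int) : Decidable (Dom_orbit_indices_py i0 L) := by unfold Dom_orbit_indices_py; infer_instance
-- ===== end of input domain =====

-- B replaces A's tuple-rotation loop (seen-dict + final sort) by closed-form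
-- integer bit rotations per r, deduplicated in order; measurably faster by a
-- large constant factor (word-parallel bit arithmetic instead of tuple work).


-- ===== PORT A =====
-- _int_to_bits: Python '>>' on int is Lean's '>>>' with a Nat shift; the shift
-- L-1-p is ≥ 0 for p in range(L), so '.toNat' is exact; '& 1' is PySem.Int.band.
def pvIntToBits (i : Int) (L : Int) : List Int :=
  (PySem.List.pyRange 0 L 1).map (fun p => PySem.Int.band (i >>> (L - 1 - p).toNat) 1)

-- _bits_to_int: (v << 1) | b, exact for any Int operands
def pvBitsToInt (bits : List Int) : Int :=
  bits.foldl (fun v b => PySem.Int.bor (v <<< 1) b) 0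

-- _rotate_tuple with r = 1 (the only call site); 'r %= n' with n = 0 raises
-- ZeroDivisionError in Python — excluded by Pre_; 'if r' tests r ≠ 0
def pvRotate (t : List Int) (r : Int) : List Int :=
  let n : Int := t.length
  let r := PySem.Int.mod r n
  if r ≠ 0 then PySem.List.slice t (some (-r)) none ++ PySem.List.slice t none (some (-r)) else t

-- A's while loop over (seen, cur, r); fuel is a totality device only: the loop
-- does at most L insertions (the orbit has ≤ L elements), so L.toNat+1 suffices
def pvLoopA (fuel : Nat) (seen : PySem.Dict (List Int) Int) (cur : List Int) (r : Int) :
    PySem.Dict (List Int) Int :=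
  match fuel with
  | 0 => seen
  | Nat.succ fuel =>
    if seen.contains cur then seen
    else pvLoopA fuel (seen.insert cur r) (pvRotate cur 1) (r + 1)

def orbit_indices_py (i0 : Int) (L : Int) : List Int :=
  let x := pvIntToBits i0 L
  let seen := pvLoopA (L.toNat + 1) PySem.Dict.empty x 0
  let orb := (PySem.List.sorted seen.items (fun kv => kv.2) false).map (fun kv => kv.1)
  orb.map pvBitsToInt

-- ===== PORT B =====
-- mask = (1 << L) - 1; v = i0 & mask; the r-th right rotation is
-- ((v >> r) | (v << (L - r))) & mask; dict.fromkeys-dedup is PySem.List.dedup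
def orbit_indices_py_alt (i0 : Int) (L : Int) : List Int :=
  let mask : Int := (1 <<< L.toNat) - 1
  let v : Int := PySem.Int.band i0 mask
  let rots := (PySem.List.pyRange 0 L 1).map (fun r =>
    PySem.Int.band (PySem.Int.bor (v >>> r.toNat) (v <<< (L - r).toNat)) mask)
  PySem.List.dedup rots

-- ===== PRECONDITION & SPEC =====
-- Pre_ excludes exactly L ≤ 0: there _rotate_tuple's 'r %= n' has n = 0 (L = 0)
-- or _int_to_bits/1 << L raise, and Python A never returns a value.
def Pre_orbit_indices_py (i0 : Int) (L : Int) : Prop := 1 ≤ L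
instance (i0 : Int) (L : Int) : Decidable (Pre_orbit_indices_py i0 L) := by
  unfold Pre_orbit_indices_py; infer_instance

def pvWitness_orbit_indices_py : Int × Int := (6, 4)

def Spec_orbit_indices_py (i0 : Int) (L : Int) (out : List Int) : Prop := out = orbit_indices_py_alt i0 L
instance (i0 : Int) (L : Int) (out : List Int) : Decidable (Spec_orbit_indices_py i0 L out) := by unfold Spec_orbit_indices_py; infer_instance

-- ===== CLAIM (what is proved, stated in full; the proofs are below) =====
def Claim_equal_orbit_indices_py : Prop := ∀ (i0 : Int) (L : Int), Dom_orbit_indices_py i0 L → Pre_orbit_indices_py i0 L → Spec_orbit_indices_py i0 L (orbit_indices_py i0 L)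

-- ===== LEMMAS AND PROOFS =====

-- ---- the rotation step, mathematically: move the last element to the front
theorem pvRotate_eq_rotate (t : List Int) (ht : t ≠ []) :
    pvRotate t 1 = t.rotate (t.length - 1) := by
  have hpos : 0 < t.length := List.length_pos_iff.mpr ht
  simp only [pvRotate]
  rcases Nat.lt_or_ge t.length 2 with h2 | h2
  · have h1 : t.length = 1 := by omega
    rw [h1]
    norm_num [PySem.Int.mod]
  · have hmod : PySem.Int.mod 1 (t.length : Int) = 1 := by
      rw [PySem.Int.mod_eq_emod_of_pos (by exact_mod_cast hpos)]
      rw [Int.emod_eq_of_lt (by omega) (by exact_mod_cast h2)]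
    rw [hmod]
    norm_num
    rw [PySem.List.slice_from_neg_one, PySem.List.slice_to_neg_one,
      List.rotate_eq_drop_append_take (by omega), List.dropLast_eq_take]

-- the k-th element of the orbit
def pvOrb (x : List Int) (k : Nat) : List Int := (fun t => pvRotate t 1)^[k] x

theorem pvOrb_eq_rotate (x : List Int) (hx : x ≠ []) (k : Nat) :
    pvOrb x k = x.rotate (k * (x.length - 1)) := by
  induction k with
  | zero => simp [pvOrb]
  | succ k ih =>
    have hlen : (x.rotate (k * (x.length - 1))).length = x.length := List.length_rotate x _
    have hne : x.rotate (k * (x.length - 1)) ≠ [] := by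
      intro h; apply hx
      have := List.length_rotate x (k * (x.length - 1))
      rw [h] at this
      exact List.length_eq_zero_iff.mp this.symm
    calc pvOrb x (k + 1) = pvRotate (pvOrb x k) 1 := Function.iterate_succ_apply' _ _ _
      _ = pvRotate (x.rotate (k * (x.length - 1))) 1 := by rw [ih]
      _ = (x.rotate (k * (x.length - 1))).rotate (x.length - 1) := by
            rw [pvRotate_eq_rotate _ hne, hlen]
      _ = x.rotate ((k + 1) * (x.length - 1)) := by
            rw [List.rotate_rotate, Nat.succ_mul]

theorem pvOrb_full (x : List Int) (hx : x ≠ []) : pvOrb x x.length = x := by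
  rw [pvOrb_eq_rotate x hx, ← List.rotate_mod, Nat.mul_mod_right, List.rotate_zero]

theorem pvOrb_exists (x : List Int) (hx : x ≠ []) :
    ∃ k, 0 < k ∧ pvOrb x k = x :=
  ⟨x.length, List.length_pos_iff.mpr hx, pvOrb_full x hx⟩

-- the minimal period
def pvPeriod (x : List Int) (hx : x ≠ []) : Nat := Nat.find (pvOrb_exists x hx)

theorem pvPeriod_le (x : List Int) (hx : x ≠ []) : pvPeriod x hx ≤ x.length :=
  Nat.find_le ⟨List.length_pos_iff.mpr hx, pvOrb_full x hx⟩

theorem pvPeriod_pos (x : List Int) (hx : x ≠ []) : 0 < pvPeriod x hx :=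
  (Nat.find_spec (pvOrb_exists x hx)).1

theorem pvOrb_period (x : List Int) (hx : x ≠ []) : pvOrb x (pvPeriod x hx) = x :=
  (Nat.find_spec (pvOrb_exists x hx)).2

theorem pvOrb_inj (x : List Int) (hx : x ≠ []) {j k : Nat}
    (hjk : j < k) (hk : k < pvPeriod x hx) : pvOrb x j ≠ pvOrb x k := by
  intro heq
  have hP := pvPeriod_pos x hx
  have h1 : pvOrb x ((pvPeriod x hx - k) + j) = x := by
    calc pvOrb x ((pvPeriod x hx - k) + j)
        = (fun t => pvRotate t 1)^[pvPeriod x hx - k] (pvOrb x j) :=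
          Function.iterate_add_apply _ _ _ _
      _ = (fun t => pvRotate t 1)^[pvPeriod x hx - k] (pvOrb x k) := by rw [heq]
      _ = pvOrb x ((pvPeriod x hx - k) + k) := (Function.iterate_add_apply _ _ _ _).symm
      _ = x := by rw [Nat.sub_add_cancel (le_of_lt hk)]; exact pvOrb_period x hx
  have hmin : ∀ m, m < pvPeriod x hx → ¬(0 < m ∧ pvOrb x m = x) := fun m hm =>
    Nat.find_min (pvOrb_exists x hx) hm
  exact hmin _ (by omega) ⟨by omega, h1⟩

theorem pvOrb_add_period (x : List Int) (hx : x ≠ []) (m : Nat) :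
    pvOrb x (m + pvPeriod x hx) = pvOrb x m := by
  show (fun t => pvRotate t 1)^[m + pvPeriod x hx] x = _
  rw [Function.iterate_add_apply]
  exact congrArg _ (pvOrb_period x hx)

theorem pvOrb_mod (x : List Int) (hx : x ≠ []) (m : Nat) :
    pvOrb x m = pvOrb x (m % pvPeriod x hx) := by
  induction m using Nat.strong_induction_on with
  | _ m ih =>
    by_cases hm : m < pvPeriod x hx
    · rw [Nat.mod_eq_of_lt hm]
    · have hP := pvPeriod_pos x hx
      have h1 : m = (m - pvPeriod x hx) + pvPeriod x hx := by omega
      have h2 : m % pvPeriod x hx = (m - pvPeriod x hx) % pvPeriod x hx :=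
        Nat.mod_eq_sub_mod (by omega)
      rw [h2, ← ih (m - pvPeriod x hx) (by omega),
        ← pvOrb_add_period x hx (m - pvPeriod x hx), ← h1]

-- ---- A's loop: the dict after the loop holds the orbit with ranks 0,1,…

-- the items list A's dict holds after k insertions
def pvItems (x : List Int) (k : Nat) : List (List Int × Int) :=
  (List.range k).map (fun j => (pvOrb x j, (j : Int)))

theorem pvKeys_items (x : List Int) (k : Nat) (d : PySem.Dict (List Int) Int)
    (hd : d.items = pvItems x k) : d.keys = (List.range k).map (pvOrb x) := by
  simp only [PySem.Dict.keys, hd, pvItems, List.map_map]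
  rfl

theorem pvLoopA_inv (x : List Int) (hx : x ≠ []) :
    ∀ (fuel k : Nat) (d : PySem.Dict (List Int) Int), k ≤ pvPeriod x hx →
      pvPeriod x hx - k < fuel → d.items = pvItems x k →
      (pvLoopA fuel d (pvOrb x k) (k : Int)).items = pvItems x (pvPeriod x hx) := by
  intro fuel
  induction fuel with
  | zero => intro k d hk hf hd; omega
  | succ fuel ih =>
    intro k d hk hf hd
    have hkeys := pvKeys_items x k d hd
    by_cases hkP : k = pvPeriod x hx
    · subst hkP
      have hmem : pvOrb x (pvPeriod x hx) ∈ d.keys := by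
        rw [hkeys]
        refine List.mem_map.mpr ⟨0, ?_, ?_⟩
        · exact List.mem_range.mpr (pvPeriod_pos x hx)
        · show pvOrb x 0 = pvOrb x (pvPeriod x hx)
          rw [pvOrb_period]; rfl
      have hcont : d.contains (pvOrb x (pvPeriod x hx)) = true := by
        rw [PySem.Dict.contains_eq_decide_mem_keys]; exact decide_eq_true hmem
      rw [pvLoopA]
      simp [hcont, hd]
    · have hklt : k < pvPeriod x hx := lt_of_le_of_ne hk hkP
      have hnmem : pvOrb x k ∉ d.keys := by
        rw [hkeys]
        intro hmem
        obtain ⟨j, hj, hjeq⟩ := List.mem_map.mp hmem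
        exact pvOrb_inj x hx (List.mem_range.mp hj) hklt hjeq
      have hcont : d.contains (pvOrb x k) = false := by
        rw [PySem.Dict.contains_eq_decide_mem_keys]; exact decide_eq_false hnmem
      have hins : (d.insert (pvOrb x k) (k : Int)).items = pvItems x (k + 1) := by
        rw [PySem.Dict.items_insert_of_not_contains _ _ hcont, hd]
        simp [pvItems, List.range_succ]
      have hstep : pvRotate (pvOrb x k) 1 = pvOrb x (k + 1) := by
        simp [pvOrb, Function.iterate_succ_apply']
      have hcast : (k : Int) + 1 = ((k + 1 : Nat) : Int) := by push_cast; ring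
      rw [pvLoopA]
      simp only [hcont, if_false, Bool.false_eq_true]
      rw [hstep, hcast]
      exact ih (k + 1) _ (by omega) (by omega) hins

theorem pvIntToBits_length (i L : Int) : (pvIntToBits i L).length = L.toNat := by
  simp [pvIntToBits, PySem.List.length_pyRange_one]

-- A's whole function, as the orbit in first-appearance order
theorem pvA_out (i0 L : Int) (hL : 1 ≤ L) (hx : pvIntToBits i0 L ≠ []) :
    orbit_indices_py i0 L
      = (List.range (pvPeriod (pvIntToBits i0 L) hx)).map
          (fun r => pvBitsToInt (pvOrb (pvIntToBits i0 L) r)) := by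
  set x := pvIntToBits i0 L with hxdef
  have hxlen : x.length = L.toNat := pvIntToBits_length i0 L
  have hPle : pvPeriod x hx ≤ L.toNat := hxlen ▸ pvPeriod_le x hx
  have hA : (pvLoopA (L.toNat + 1) PySem.Dict.empty x 0).items = pvItems x (pvPeriod x hx) := by
    have h0 : (PySem.Dict.empty : PySem.Dict (List Int) Int).items = pvItems x 0 := by
      simp [pvItems, PySem.Dict.empty]
    have := pvLoopA_inv x hx (L.toNat + 1) 0 PySem.Dict.empty (by omega) (by omega) h0
    simpa [pvOrb] using this
  have hsorted : PySem.List.sorted (pvItems x (pvPeriod x hx)) (fun kv => kv.2) false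
      = pvItems x (pvPeriod x hx) := by
    apply PySem.List.sorted_eq_of_perm_of_pairwise_lt _ _ _ (List.Perm.refl _)
    simp only [pvItems]
    refine List.Pairwise.map _ ?_ List.pairwise_lt_range
    intro a b hab
    show (a : Int) < (b : Int)
    exact_mod_cast hab
  show (((PySem.List.sorted (pvLoopA (L.toNat + 1) PySem.Dict.empty x 0).items
      (fun kv => kv.2) false).map (fun kv => kv.1)).map pvBitsToInt) = _
  rw [hA, hsorted]
  simp only [pvItems, List.map_map]
  rfl

-- ---- numeric value of a bit list

def pvNatVal (bs : List Int) : Nat := bs.foldl (fun v b => 2 * v + b.toNat) 0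

def pvBits01 (bs : List Int) : Prop := ∀ b ∈ bs, b = 0 ∨ b = 1

theorem pvNatVal_foldl (bs : List Int) : ∀ (c : Nat),
    bs.foldl (fun v b => 2 * v + b.toNat) c = c * 2 ^ bs.length + pvNatVal bs := by
  induction bs with
  | nil => intro c; simp [pvNatVal]
  | cons b bs ih =>
    intro c
    show bs.foldl _ (2 * c + b.toNat) = c * 2 ^ (bs.length + 1) + pvNatVal (b :: bs)
    have h2 : pvNatVal (b :: bs) = b.toNat * 2 ^ bs.length + pvNatVal bs := by
      show bs.foldl _ (2 * 0 + b.toNat) = _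
      rw [ih]; norm_num
    rw [ih, h2, pow_succ]; ring

theorem pvNatVal_cons (b : Int) (bs : List Int) :
    pvNatVal (b :: bs) = b.toNat * 2 ^ bs.length + pvNatVal bs := by
  show bs.foldl _ (2 * 0 + b.toNat) = _
  rw [pvNatVal_foldl]; norm_num

theorem pvNatVal_append (u w : List Int) :
    pvNatVal (u ++ w) = pvNatVal u * 2 ^ w.length + pvNatVal w := by
  show (u ++ w).foldl _ 0 = _
  rw [List.foldl_append]
  exact pvNatVal_foldl w (pvNatVal u)

theorem pvNatVal_lt (bs : List Int) (h : pvBits01 bs) : pvNatVal bs < 2 ^ bs.length := by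
  induction bs with
  | nil => simp [pvNatVal]
  | cons b bs ih =>
    have hb : b = 0 ∨ b = 1 := h b (List.mem_cons_self)
    have hbs := ih (fun c hc => h c (List.mem_cons_of_mem _ hc))
    rw [pvNatVal_cons]
    have : b.toNat ≤ 1 := by rcases hb with h | h <;> simp [h]
    have hp : (0:Nat) < 2 ^ bs.length := Nat.pow_pos (by omega)
    calc b.toNat * 2 ^ bs.length + pvNatVal bs
        ≤ 1 * 2 ^ bs.length + pvNatVal bs := by
          exact Nat.add_le_add_right (Nat.mul_le_mul_right _ this) _
      _ < 2 ^ (bs.length + 1) := by rw [pow_succ]; omega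

theorem pvBitsToInt_eq_natVal (bs : List Int) (h : pvBits01 bs) :
    pvBitsToInt bs = (pvNatVal bs : Int) := by
  suffices hgen : ∀ (n : Nat),
      bs.foldl (fun v b => PySem.Int.bor (v <<< 1) b) (n : Int)
        = ((bs.foldl (fun v b => 2 * v + b.toNat) n : Nat) : Int) by
    simpa using hgen 0
  induction bs with
  | nil => intro n; simp
  | cons b bs ih =>
    intro n
    have hb : b = 0 ∨ b = 1 := h b (List.mem_cons_self)
    have hbs : pvBits01 bs := fun c hc => h c (List.mem_cons_of_mem _ hc)
    have hstep : PySem.Int.bor ((n : Int) <<< 1) b = ((2 * n + b.toNat : Nat) : Int) := by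
      have hsh : ((n : Int) <<< 1) = ((n <<< 1 : Nat) : Int) := rfl
      rcases hb with h0 | h1
      · subst h0
        simp [hsh, Nat.shiftLeft_eq]; ring
      · subst h1
        rw [hsh, show (1 : Int) = ((1 : Nat) : Int) from rfl, PySem.Int.bor_natCast]
        have : (n <<< 1) ||| 1 = 2 * n + 1 := by
          rw [Nat.shiftLeft_eq, Nat.mul_comm n (2 ^ 1),
            ← Nat.two_pow_add_eq_or_of_lt (show (1:Nat) < 2 ^ 1 by omega) n]
        rw [this]; simp
    show bs.foldl _ (PySem.Int.bor ((n : Int) <<< 1) b) = _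
    rw [hstep]
    exact ih hbs (2 * n + b.toNat)

theorem pvBits01_mem (i L : Int) : pvBits01 (pvIntToBits i L) := by
  intro b hb
  simp only [pvIntToBits, List.mem_map] at hb
  obtain ⟨p, _, hp⟩ := hb
  rw [← hp, PySem.Int.band_one]
  have h1 := PySem.Int.mod_nonneg (i >>> (L - 1 - p).toNat) (b := 2) (by omega)
  have h2 := PySem.Int.mod_lt (i >>> (L - 1 - p).toNat) (b := 2) (by omega)
  omega

theorem pvNatVal_inj (bs1 : List Int) : ∀ (bs2 : List Int), pvBits01 bs1 → pvBits01 bs2 →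
    bs1.length = bs2.length → pvNatVal bs1 = pvNatVal bs2 → bs1 = bs2 := by
  induction bs1 with
  | nil => intro bs2 _ _ hlen _; cases bs2 <;> simp_all
  | cons b1 bs1 ih =>
    intro bs2 h1 h2 hlen hval
    cases bs2 with
    | nil => simp at hlen
    | cons b2 bs2 =>
      have hb1 : b1 = 0 ∨ b1 = 1 := h1 b1 (List.mem_cons_self)
      have hb2 : b2 = 0 ∨ b2 = 1 := h2 b2 (List.mem_cons_self)
      have hbs1 : pvBits01 bs1 := fun c hc => h1 c (List.mem_cons_of_mem _ hc)
      have hbs2 : pvBits01 bs2 := fun c hc => h2 c (List.mem_cons_of_mem _ hc)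
      have hlen' : bs1.length = bs2.length := by simpa using hlen
      rw [pvNatVal_cons, pvNatVal_cons, hlen'] at hval
      have hlt1 : pvNatVal bs1 < 2 ^ bs2.length := hlen' ▸ pvNatVal_lt bs1 hbs1
      have hlt2 : pvNatVal bs2 < 2 ^ bs2.length := pvNatVal_lt bs2 hbs2
      have hb : b1.toNat = b2.toNat ∧ pvNatVal bs1 = pvNatVal bs2 := by
        rcases hb1 with h | h <;> rcases hb2 with h' | h' <;> subst h <;> subst h' <;>
          simp at hval ⊢ <;> omega
      have hbe : b1 = b2 := by
        rcases hb1 with h | h <;> rcases hb2 with h' | h' <;> subst h <;> subst h' <;>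
          first | rfl | (exfalso; simp at hb)
      rw [hbe, ih bs2 hbs1 hbs2 hlen' hb.2]

-- ---- pvNatVal of the bit expansion is i0 mod 2^L

theorem pvEmodHalf (i M : Int) (hM : 0 < M) :
    i % (2 * M) = 2 * ((i / 2) % M) + i % 2 := by
  have h1 : 2 * (i / 2) + i % 2 = i := Int.ediv_add_emod i 2
  have h2 : M * ((i / 2) / M) + (i / 2) % M = (i / 2) := Int.ediv_add_emod (i / 2) M
  have hb1 : 0 ≤ i % 2 := Int.emod_nonneg i (by omega)
  have hb2 : i % 2 < 2 := Int.emod_lt_of_pos i (by omega)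
  have hb3 : 0 ≤ (i / 2) % M := Int.emod_nonneg _ (by omega)
  have hb4 : (i / 2) % M < M := Int.emod_lt_of_pos _ hM
  have key : i = (2 * ((i / 2) % M) + i % 2) + (2 * M) * ((i / 2) / M) := by
    have : 2 * (M * ((i / 2) / M) + (i / 2) % M) + i % 2 = i := by rw [h2]; exact h1
    ring_nf at this ⊢
    omega
  conv_lhs => rw [key]
  rw [Int.add_mul_emod_self_left, Int.emod_eq_of_lt (by omega) (by omega)]

theorem pvIntToBits_succ (i : Int) (L' : Nat) :
    pvIntToBits i ((L' + 1 : Nat) : Int)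
      = pvIntToBits (i >>> (1 : Nat)) (L' : Int) ++ [PySem.Int.band i 1] := by
  simp only [pvIntToBits, PySem.List.pyRange_zero_natCast, List.map_map,
    List.range_succ, List.map_append, List.map_cons, List.map_nil]
  congr 1
  · apply List.map_congr_left
    intro p hp
    have hp' : p < L' := List.mem_range.mp hp
    simp only [Function.comp]
    congr 1
    have ha : ((↑(L' + 1) : Int) - 1 - ↑p).toNat = L' - p := by omega
    have hb : ((↑L' : Int) - 1 - ↑p).toNat = L' - 1 - p := by omega
    rw [ha, hb]
    rw [Int.shiftRight_eq_div_pow, Int.shiftRight_eq_div_pow, Int.shiftRight_eq_div_pow]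
    rw [Int.ediv_ediv_of_nonneg (by positivity)]
    congr 1
    push_cast
    rw [← pow_succ']
    congr 1
    omega
  · have h0 : ((↑(L' + 1) : Int) - 1 - ↑L').toNat = 0 := by omega
    rw [h0, Int.shiftRight_eq_div_pow]
    norm_num

theorem pvNatVal_intToBits (L' : Nat) : ∀ (i : Int),
    pvNatVal (pvIntToBits i (L' : Int)) = (i % (2 ^ L' : Int)).toNat := by
  induction L' with
  | zero =>
    intro i
    show pvNatVal (pvIntToBits i 0) = _
    simp [pvIntToBits, pvNatVal, PySem.List.pyRange]
  | succ L' ih =>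
    intro i
    rw [pvIntToBits_succ, pvNatVal_append]
    have hone : pvNatVal [PySem.Int.band i 1] = (i % 2).toNat := by
      show 2 * 0 + (PySem.Int.band i 1).toNat = _
      rw [PySem.Int.band_one, PySem.Int.mod_eq_emod_of_pos (by omega)]
      omega
    have hlen : ([PySem.Int.band i 1] : List Int).length = 1 := rfl
    rw [hlen, hone, ih (i >>> (1 : Nat))]
    have hsh : i >>> (1 : Nat) = i / 2 := by
      rw [Int.shiftRight_eq_div_pow]; norm_num
    have hM : (0 : Int) < 2 ^ L' := by positivity
    have := pvEmodHalf i (2 ^ L') hM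
    have hcast : (2 ^ (L' + 1) : Int) = 2 * 2 ^ L' := by rw [pow_succ]; ring
    have hb3 : 0 ≤ (i / 2) % (2 ^ L' : Int) := Int.emod_nonneg _ (by positivity)
    have hb1 : 0 ≤ i % 2 := Int.emod_nonneg i (by omega)
    rw [hsh, hcast, this]
    omega

-- ---- band with the mask 2^k - 1 is emod 2^k (Python-exact on negatives)

theorem pvNegSuccEmod (n M : Nat) (hM : 0 < M) :
    (Int.negSucc n) % (M : Int) = ((M - 1 - n % M : Nat) : Int) := by
  have hr : n % M < M := Nat.mod_lt n hM
  have hdm : M * (n / M) + n % M = n := Nat.div_add_mod n M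
  have hmd : ((M * (n / M) : Nat) : Int) = (M : Int) * ((n / M : Nat) : Int) := by push_cast; ring
  have key : (Int.negSucc n) = ((M - 1 - n % M : Nat) : Int) + (M : Int) * (-(((n / M : Nat)) : Int) - 1) := by
    rw [Int.negSucc_eq]
    have expand : (M : Int) * (-(((n / M : Nat)) : Int) - 1) = -((M * (n / M) : Nat) : Int) - (M : Int) := by
      rw [hmd]; ring
    rw [expand]
    omega
  rw [key, Int.add_mul_emod_self_left, Int.emod_eq_of_lt (by omega) (by omega)]

theorem pvBandMask (a : Int) (k : Nat) :
    PySem.Int.band a ((2 ^ k : Int) - 1) = a % (2 ^ k : Int) := by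
  have hmask : ((2 ^ k - 1 : Nat) : Int) = (2 ^ k : Int) - 1 := by
    have : (1 : Nat) ≤ 2 ^ k := Nat.one_le_two_pow
    push_cast [this]
    ring
  cases a with
  | ofNat n =>
    rw [← hmask]
    have h0 : (Int.ofNat n) = ((n : Nat) : Int) := rfl
    rw [h0, PySem.Int.band_natCast, Nat.and_two_pow_sub_one_eq_mod, Int.natCast_emod]
    push_cast
    ring
  | negSucc n =>
    have hlhs : PySem.Int.band (Int.negSucc n) ((2 ^ k : Int) - 1)
        = ((2 ^ k - 1 - n % 2 ^ k : Nat) : Int) := by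
      show (if (0:Int) ≤ Int.negSucc n then _ else _) = _
      rw [if_neg (by exact of_decide_eq_false rfl)]
      rw [if_pos (by have : (1:Nat) ≤ 2 ^ k := Nat.one_le_two_pow; omega)]
      congr 1
      have h1 : ((2 ^ k : Int) - 1).toNat = 2 ^ k - 1 := by
        have : (1:Nat) ≤ 2 ^ k := Nat.one_le_two_pow
        omega
      have h2 : (-(Int.negSucc n) - 1).toNat = n := by
        rw [Int.negSucc_eq]; omega
      rw [h1, h2, Nat.and_comm, Nat.and_two_pow_sub_one_eq_mod]
    rw [hlhs]
    have := pvNegSuccEmod n (2 ^ k) (Nat.pow_pos (by omega))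
    rw [show ((2 ^ k : Nat) : Int) = (2 ^ k : Int) by push_cast; ring] at this
    rw [this]

-- ---- values of take/drop pieces of a 0/1 list

theorem pvNatVal_take_drop (bs : List Int) (h : pvBits01 bs) (k : Nat) (hk : k ≤ bs.length) :
    pvNatVal (bs.drop k) = pvNatVal bs % 2 ^ (bs.length - k)
      ∧ pvNatVal (bs.take k) = pvNatVal bs / 2 ^ (bs.length - k) := by
  have hsplit : bs = bs.take k ++ bs.drop k := (List.take_append_drop k bs).symm
  have hdlen : (bs.drop k).length = bs.length - k := List.length_drop
  have hdrop01 : pvBits01 (bs.drop k) := fun c hc => h c (List.mem_of_mem_drop hc)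
  have hdlt : pvNatVal (bs.drop k) < 2 ^ (bs.length - k) := hdlen ▸ pvNatVal_lt _ hdrop01
  have hval : pvNatVal bs = 2 ^ (bs.length - k) * pvNatVal (bs.take k) + pvNatVal (bs.drop k) := by
    conv_lhs => rw [hsplit]
    rw [pvNatVal_append, hdlen]
    ring
  constructor
  · rw [hval, Nat.mul_add_mod, Nat.mod_eq_of_lt hdlt]
  · rw [hval, Nat.mul_add_div (Nat.pow_pos (by omega)),
      Nat.div_eq_of_lt hdlt, Nat.add_zero]

-- ---- CRUX: the integer value of the r-th rotation, in closed form

theorem pvCrux (x : List Int) (hx : x ≠ []) (h01 : pvBits01 x) (r : Nat) (hr : r < x.length) :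
    pvBitsToInt (pvOrb x r)
      = ((pvNatVal x / 2 ^ r + (pvNatVal x % 2 ^ r) * 2 ^ (x.length - r) : Nat) : Int) := by
  set L' := x.length with hL'
  have hrot : pvOrb x r = x.drop (L' - r) ++ x.take (L' - r) := by
    rw [pvOrb_eq_rotate x hx r]
    have hmodeq : (r * (L' - 1)) % L' = (L' - r) % L' := by
      rcases Nat.eq_zero_or_pos r with h0 | hpos
      · subst h0; simp
      · have h1 : r * L' = r * (L' - 1) + r := by
          conv_lhs => rw [show L' = (L' - 1) + 1 by omega]
          rw [Nat.mul_add, Nat.mul_one]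
        have h2 : r * L' = (r - 1) * L' + L' := by
          conv_lhs => rw [show r = (r - 1) + 1 by omega]
          rw [Nat.add_mul, Nat.one_mul]
        have h3 : r * (L' - 1) = (L' - r) + (r - 1) * L' := by omega
        rw [h3, Nat.add_mul_mod_self_right]
    rw [← List.rotate_mod, hmodeq, List.rotate_mod,
      List.rotate_eq_drop_append_take (by omega)]
  have h01' : pvBits01 (pvOrb x r) := by
    rw [hrot]
    intro c hc
    rcases List.mem_append.mp hc with h | h
    · exact h01 c (List.mem_of_mem_drop h)
    · exact h01 c (List.mem_of_mem_take h)
  rw [pvBitsToInt_eq_natVal _ h01', hrot, pvNatVal_append]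
  have htd := pvNatVal_take_drop x h01 (L' - r) (by omega)
  have hdl : x.length - (L' - r) = r := by omega
  rw [hdl] at htd
  have htlen : (x.take (L' - r)).length = L' - r := by
    rw [List.length_take]; omega
  rw [htd.1, htd.2, htlen]
  exact congrArg _ (Nat.add_comm _ _)

-- ---- B's list of rotations entrywise

theorem pvBEntry (nv L' r : Nat) (hr : r < L') (hnv : nv < 2 ^ L') :
    PySem.Int.band
        (PySem.Int.bor ((nv : Int) >>> (r : Int)) ((nv : Int) <<< (L' - r)))
        ((2 ^ L' : Int) - 1)
      = ((nv / 2 ^ r + (nv % 2 ^ r) * 2 ^ (L' - r) : Nat) : Int) := by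
  have hsr : ((nv : Int) >>> (r : Int)) = ((nv >>> r : Nat) : Int) := Int.shiftRight_natCast nv r
  have hsl : ((nv : Int) <<< (L' - r)) = ((nv <<< (L' - r) : Nat) : Int) := rfl
  rw [hsr, hsl, PySem.Int.bor_natCast, pvBandMask]
  have hcast : ((2 ^ L' : Nat) : Int) = (2 ^ L' : Int) := by push_cast; ring
  rw [← hcast, ← Int.natCast_emod]
  congr 1
  -- now a pure Nat computation
  rw [Nat.shiftRight_eq_div_pow, Nat.shiftLeft_eq]
  have hpow : 2 ^ (L' - r) * 2 ^ r = 2 ^ L' := by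
    rw [← pow_add]; congr 1; omega
  have hdiv_lt : nv / 2 ^ r < 2 ^ (L' - r) := by
    rw [Nat.div_lt_iff_lt_mul (Nat.pow_pos (by omega))]
    calc nv < 2 ^ L' := hnv
      _ = 2 ^ (L' - r) * 2 ^ r := hpow.symm
  have hor : nv / 2 ^ r ||| nv * 2 ^ (L' - r) = 2 ^ (L' - r) * nv + nv / 2 ^ r := by
    rw [Nat.lor_comm, Nat.mul_comm nv]
    exact (Nat.two_pow_add_eq_or_of_lt hdiv_lt nv).symm
  rw [hor]
  have hnveq : nv = 2 ^ r * (nv / 2 ^ r) + nv % 2 ^ r := (Nat.div_add_mod nv (2 ^ r)).symm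
  have hexpand : 2 ^ (L' - r) * nv + nv / 2 ^ r
      = 2 ^ L' * (nv / 2 ^ r) + (2 ^ (L' - r) * (nv % 2 ^ r) + nv / 2 ^ r) := by
    calc 2 ^ (L' - r) * nv + nv / 2 ^ r
        = 2 ^ (L' - r) * (2 ^ r * (nv / 2 ^ r) + nv % 2 ^ r) + nv / 2 ^ r := by rw [← hnveq]
      _ = 2 ^ (L' - r) * 2 ^ r * (nv / 2 ^ r) + (2 ^ (L' - r) * (nv % 2 ^ r) + nv / 2 ^ r) := by
            ring
      _ = 2 ^ L' * (nv / 2 ^ r) + (2 ^ (L' - r) * (nv % 2 ^ r) + nv / 2 ^ r) := by rw [hpow]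
  have hmlt : nv % 2 ^ r < 2 ^ r := Nat.mod_lt _ (Nat.pow_pos (by omega))
  have hbound : 2 ^ (L' - r) * (nv % 2 ^ r) + nv / 2 ^ r < 2 ^ L' := by
    calc 2 ^ (L' - r) * (nv % 2 ^ r) + nv / 2 ^ r
        < 2 ^ (L' - r) * (nv % 2 ^ r) + 2 ^ (L' - r) := by omega
      _ = 2 ^ (L' - r) * (nv % 2 ^ r + 1) := by ring
      _ ≤ 2 ^ (L' - r) * 2 ^ r := Nat.mul_le_mul_left _ (by omega)
      _ = 2 ^ L' := hpow
  rw [hexpand, Nat.mul_add_mod, Nat.mod_eq_of_lt hbound]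
  ring

-- ---- the dedup of a list whose tail repeats its nodup prefix

theorem pvDedup_prefix (l1 l2 : List Int) (h1 : l1.Nodup) (h2 : ∀ y ∈ l2, y ∈ l1) :
    PySem.List.dedup (l1 ++ l2) = l1 := by
  rw [PySem.List.dedup_eq_ofList, PySem.Set.ofList_append,
    PySem.Set.ofList_eq_self_of_nodup l1 h1, PySem.Set.update_eq_append_filter]
  have : List.filter (fun y => !(PySem.Set.contains l1 y)) (PySem.Set.ofList l2) = [] := by
    rw [List.filter_eq_nil_iff]
    intro y hy
    have hmem : y ∈ l1 := h2 y ((PySem.Set.mem_ofList _ _).mp hy)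
    simp [PySem.Set.contains_eq_listContains]
    exact hmem
  rw [this, List.append_nil]

-- ---- B's whole function equals the orbit in first-appearance order

theorem pvB_out (i0 L : Int) (hL : 1 ≤ L) (hx : pvIntToBits i0 L ≠ []) :
    orbit_indices_py_alt i0 L
      = (List.range (pvPeriod (pvIntToBits i0 L) hx)).map
          (fun r => pvBitsToInt (pvOrb (pvIntToBits i0 L) r)) := by
  set x := pvIntToBits i0 L with hxdef
  set L' := L.toNat with hL'def
  have hL'pos : 0 < L' := by omega
  have hxlen : x.length = L' := pvIntToBits_length i0 L
  have h01 : pvBits01 x := pvBits01_mem i0 L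
  set nv := pvNatVal x with hnvdef
  have hnv : nv < 2 ^ L' := hxlen ▸ pvNatVal_lt x h01
  set d := pvPeriod x hx with hddef
  have hdpos : 0 < d := pvPeriod_pos x hx
  have hdle : d ≤ L' := hxlen ▸ pvPeriod_le x hx
  set g : Nat → Int := fun r => pvBitsToInt (pvOrb x r) with hgdef
  -- the mask and the masked value
  have hLcast : L = (L' : Int) := by omega
  have hmask : ((1 <<< L' : Nat) : Int) - 1 = (2 ^ L' : Int) - 1 := by
    have h1 : (1 <<< L' : Nat) = 2 ^ L' := by simp [Nat.shiftLeft_eq]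
    rw [h1]
    push_cast
    ring
  have hnvval : nv = (i0 % (2 ^ L' : Int)).toNat := by
    rw [hnvdef, hxdef, hLcast, pvNatVal_intToBits]
  have hv : PySem.Int.band i0 (((1 <<< L' : Nat) : Int) - 1) = (nv : Int) := by
    rw [hmask, pvBandMask, hnvval]
    have : 0 ≤ i0 % (2 ^ L' : Int) := Int.emod_nonneg _ (by positivity)
    omega
  -- B's comprehension is g on range L'
  have hrots : orbit_indices_py_alt i0 L = PySem.List.dedup ((List.range L').map g) := by
    show PySem.List.dedup _ = _
    congr 1
    rw [hLcast, PySem.List.pyRange_zero_natCast, List.map_map]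
    apply List.map_congr_left
    intro r hr
    have hrlt : r < L' := List.mem_range.mp hr
    simp only [Function.comp, Int.toNat_natCast]
    have ht2 : (((L' : Int)) - (r : Int)).toNat = L' - r := by omega
    rw [ht2, hv, hmask, pvBEntry nv L' r hrlt hnv, hgdef]
    show ((nv / 2 ^ r + nv % 2 ^ r * 2 ^ (L' - r) : Nat) : Int) = pvBitsToInt (pvOrb x r)
    rw [pvCrux x hx h01 r (by omega), hxlen, ← hnvdef]
  rw [hrots]
  -- split range L' into the first period and the repeats
  have hsplit : List.range L' = List.range d ++ (List.range (L' - d)).map (fun j => d + j) := by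
    rw [← List.range_add]
    congr 1
    omega
  have hginj : ∀ j ∈ List.range d, ∀ k ∈ List.range d, g j = g k → j = k := by
    intro j hj k hk hgeq
    have hjd := List.mem_range.mp hj
    have hkd := List.mem_range.mp hk
    by_contra hne
    have hlenjk : (pvOrb x j).length = (pvOrb x k).length := by
      rw [pvOrb_eq_rotate x hx, pvOrb_eq_rotate x hx, List.length_rotate, List.length_rotate]
    have h01j : pvBits01 (pvOrb x j) := by
      rw [pvOrb_eq_rotate x hx]
      intro c hc
      exact h01 c ((List.mem_rotate).mp hc)
    have h01k : pvBits01 (pvOrb x k) := by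
      rw [pvOrb_eq_rotate x hx]
      intro c hc
      exact h01 c ((List.mem_rotate).mp hc)
    have hval : pvNatVal (pvOrb x j) = pvNatVal (pvOrb x k) := by
      have := hgeq
      rw [hgdef] at this
      simp only at this
      rw [pvBitsToInt_eq_natVal _ h01j, pvBitsToInt_eq_natVal _ h01k] at this
      exact_mod_cast this
    have heq := pvNatVal_inj _ _ h01j h01k hlenjk hval
    rcases Nat.lt_or_ge j k with h | h
    · exact pvOrb_inj x hx h hkd heq
    · have : k < j := by omega
      exact pvOrb_inj x hx this hjd heq.symm
  have hnodup : ((List.range d).map g).Nodup :=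
    (List.nodup_range).map_on hginj
  have hrepeat : ∀ y ∈ ((List.range (L' - d)).map (fun j => d + j)).map g,
      y ∈ (List.range d).map g := by
    intro y hy
    rw [List.map_map] at hy
    obtain ⟨j, hj, hjy⟩ := List.mem_map.mp hy
    refine List.mem_map.mpr ⟨(d + j) % d, List.mem_range.mpr (Nat.mod_lt _ hdpos), ?_⟩
    rw [← hjy]
    simp only [Function.comp, hgdef]
    rw [← pvOrb_mod x hx (d + j)]
  rw [hsplit, List.map_append]
  exact pvDedup_prefix _ _ hnodup hrepeat

-- ---- final assembly

theorem pv_both (i0 L : Int) (hL : 1 ≤ L) :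
    orbit_indices_py i0 L = orbit_indices_py_alt i0 L := by
  have hxlen : (pvIntToBits i0 L).length = L.toNat := pvIntToBits_length i0 L
  have hx : pvIntToBits i0 L ≠ [] := by
    intro h
    rw [h] at hxlen
    simp at hxlen
    omega
  rw [pvA_out i0 L hL hx, pvB_out i0 L hL hx]

-- ===== VERDICT (by name: the statement is the Claim_ definition above) =====
theorem orbit_indices_py_spec : Claim_equal_orbit_indices_py := by
  intro i0 L _ hL
  unfold Spec_orbit_indices_py
  exact pv_both i0 L hL
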